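-- pv_equiv track=rewrite | github.com/cbowser33/big-ip-machine-v2.0 | routes/content.py | get_file_category
-- ===== SOURCE A (Python) =====
-- ALLOWED_EXTENSIONS = {
--     'video': {'mp4', 'mov', 'avi', 'mkv', 'wmv', 'flv', 'webm', 'm4v'},
--     'image': {'jpg', 'jpeg', 'png', 'gif', 'bmp', 'tiff', 'webp'},
--     'audio': {'mp3', 'wav', 'aac', 'flac', 'ogg', 'm4a', 'wma'},
--     'document': {'pdf', 'txt', 'doc', 'docx', 'rtf', 'odt'}
-- }
--
-- def get_file_category(filename: str) -> str:
--     """Determine file category based on extension"""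
--     if '.' not in filename:
--         return 'other'
--
--     ext = filename.rsplit('.', 1)[1].lower()
--     for category, extensions in ALLOWED_EXTENSIONS.items():
--         if ext in extensions:
--             return category
--     return 'other'
-- ===== SOURCE B (Python) =====
-- # Flat reverse index written out once: extension -> category; lookup replaces the
-- # per-call loop over categories.  Last extension taken via rpartition.
-- EXT_TO_CATEGORY = {
--     'mp4': 'video', 'mov': 'video', 'avi': 'video', 'mkv': 'video',
--     'wmv': 'video', 'flv': 'video', 'webm': 'video', 'm4v': 'video',
--     'jpg': 'image', 'jpeg': 'image', 'png': 'image', 'gif': 'image',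
--     'bmp': 'image', 'tiff': 'image', 'webp': 'image',
--     'mp3': 'audio', 'wav': 'audio', 'aac': 'audio', 'flac': 'audio',
--     'ogg': 'audio', 'm4a': 'audio', 'wma': 'audio',
--     'pdf': 'document', 'txt': 'document', 'doc': 'document',
--     'docx': 'document', 'rtf': 'document', 'odt': 'document',
-- }
--
-- def get_file_category(filename: str) -> str:
--     """Determine file category based on extension"""
--     _head, sep, tail = filename.rpartition('.')
--     if not sep:
--         return 'other'
--     return EXT_TO_CATEGORY.get(tail.lower(), 'other')
-- ===== Notes on version B (the rewrite author's own statement) =====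
-- stated objective: idiomatic
-- what changed: B extracts the extension with rpartition instead of a substring containment test plus rsplit, and replaces A's per-call loop over four category sets by a single flat reverse dict ext->category looked up once.
import Mathlib
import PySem

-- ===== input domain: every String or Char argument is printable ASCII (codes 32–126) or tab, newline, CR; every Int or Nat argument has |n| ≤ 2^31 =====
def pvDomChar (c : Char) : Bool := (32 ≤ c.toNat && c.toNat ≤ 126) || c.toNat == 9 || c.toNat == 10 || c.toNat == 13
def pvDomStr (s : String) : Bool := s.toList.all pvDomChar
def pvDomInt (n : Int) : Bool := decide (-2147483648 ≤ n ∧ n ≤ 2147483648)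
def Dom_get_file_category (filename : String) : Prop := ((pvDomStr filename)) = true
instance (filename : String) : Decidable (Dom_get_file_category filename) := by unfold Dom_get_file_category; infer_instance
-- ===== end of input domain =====

-- B replaces A's '.'-membership test + rsplit + loop-over-category-sets by a single
-- reverse scan for the last '.' and one lookup in a flat reverse index ext -> category.

-- ===== PORT A =====
-- ALLOWED_EXTENSIONS: dict of category -> set of extensions (sets ported as lists of
-- their distinct elements; only membership is taken on them).
def ALLOWED_EXTENSIONS : List (String × List String) :=
  [("video", ["mp4", "mov", "avi", "mkv", "wmv", "flv", "webm", "m4v"]),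
   ("image", ["jpg", "jpeg", "png", "gif", "bmp", "tiff", "webp"]),
   ("audio", ["mp3", "wav", "aac", "flac", "ogg", "m4a", "wma"]),
   ("document", ["pdf", "txt", "doc", "docx", "rtf", "odt"])]

-- the 'for category, extensions in ALLOWED_EXTENSIONS.items(): if ext in extensions: return category' loop
def catLoop : List (String × List String) → String → String
  | [], _ => "other"
  | (category, extensions) :: rest, ext =>
      if extensions.contains ext then category else catLoop rest ext

-- filename.rsplit('.', 1)[1]: hand-ported; exact whenever '.' occurs in filename
-- (the only case it is used in): the substring after the last '.'.
def extOf (filename : String) : String :=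
  PySem.Str.lower (String.ofList (filename.toList.drop ((PySem.Str.rfind filename ".").toNat + 1)))

def get_file_category (filename : String) : String :=
  if PySem.Str.isIn "." filename = false then "other"
  else catLoop ALLOWED_EXTENSIONS (extOf filename)

-- ===== PORT B =====
-- EXT_TO_CATEGORY: the flat reverse index, written out as a literal dict
def EXT_TO_CATEGORY : PySem.Dict String String :=
  PySem.Dict.mk
    [("mp4", "video"), ("mov", "video"), ("avi", "video"), ("mkv", "video"),
     ("wmv", "video"), ("flv", "video"), ("webm", "video"), ("m4v", "video"),
     ("jpg", "image"), ("jpeg", "image"), ("png", "image"), ("gif", "image"),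
     ("bmp", "image"), ("tiff", "image"), ("webp", "image"),
     ("mp3", "audio"), ("wav", "audio"), ("aac", "audio"), ("flac", "audio"),
     ("ogg", "audio"), ("m4a", "audio"), ("wma", "audio"),
     ("pdf", "document"), ("txt", "document"), ("doc", "document"),
     ("docx", "document"), ("rtf", "document"), ("odt", "document")]

-- filename.rpartition('.'): hand-ported as one reverse scan for the last '.';
-- returns the tail after it (exact: rpartition splits at the last occurrence),
-- none when there is no '.' (Python's sep = '').
def revScan : List Char → List Char → Option (List Char)
  | [], _ => none
  | c :: rest, acc => if c = '.' then some acc else revScan rest (c :: acc)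

def get_file_category_alt (filename : String) : String :=
  match revScan filename.toList.reverse [] with
  | none => "other"
  | some tail => PySem.Dict.getD EXT_TO_CATEGORY (PySem.Str.lower (String.ofList tail)) "other"

-- ===== PRECONDITION & SPEC =====
def Spec_get_file_category (filename : String) (out : String) : Prop := out = get_file_category_alt filename
instance (filename : String) (out : String) : Decidable (Spec_get_file_category filename out) := by unfold Spec_get_file_category; infer_instance

-- ===== CLAIM =====
def Claim_equal_get_file_category : Prop := ∀ (filename : String), Dom_get_file_category filename → Spec_get_file_category filename (get_file_category filename)

-- ===== LEMMAS AND PROOFS =====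

-- B's reverse scan characterised: the reversed take-while up to the last '.'
lemma revScan_spec (m acc : List Char) :
    revScan m acc =
      if '.' ∈ m then some ((m.takeWhile (· ≠ '.')).reverse ++ acc) else none := by
  induction m generalizing acc with
  | nil => simp [revScan]
  | cons c rest ih =>
    by_cases hc : c = '.'
    · subst hc; simp [revScan]
    · rw [revScan, if_neg hc, ih]
      by_cases hm : '.' ∈ rest <;>
        simp [hm, hc, Ne.symm hc, List.append_assoc]

-- [c] is a prefix of s iff s starts with c
lemma isPrefixOf_singleton (c : Char) (s : List Char) :
    [c].isPrefixOf s = true ↔ s[0]? = some c := by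
  rw [List.isPrefixOf_iff_prefix]
  cases s with
  | nil => simp
  | cons a t => simp [List.cons_prefix_cons, eq_comm]

-- rfind.go for a single-character needle: the greatest index ≤ k holding '.'
lemma go_spec (s : List Char) (k : Nat) (h : ∃ j ≤ k, s[j]? = some '.') :
    ∃ n : Nat, PySem.Chars.rfind.go s ['.'] k = (n : Int) ∧ n ≤ k ∧
      s[n]? = some '.' ∧ ∀ j, n < j → j ≤ k → s[j]? ≠ some '.' := by
  induction k with
  | zero =>
    obtain ⟨j, hj, hsj⟩ := h
    have hj0 : j = 0 := Nat.le_zero.mp hj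
    subst hj0
    refine ⟨0, ?_, le_refl _, hsj, by intro j h1 h2; omega⟩
    simp only [PySem.Chars.rfind.go]
    rw [if_pos ((isPrefixOf_singleton '.' s).mpr hsj)]
    simp
  | succ k ih =>
    by_cases hk : s[k+1]? = some '.'
    · refine ⟨k + 1, ?_, le_refl _, hk, by omega⟩
      simp only [PySem.Chars.rfind.go]
      rw [if_pos]
      rw [isPrefixOf_singleton, List.getElem?_drop]
      simpa using hk
    · obtain ⟨j, hj, hsj⟩ := h
      have hj' : j ≤ k := by
        rcases Nat.lt_or_ge j (k+1) with h1 | h1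
        · omega
        · exfalso; have : j = k + 1 := by omega
          subst this; exact hk hsj
      obtain ⟨n, hgo, hnk, hsn, hmax⟩ := ih ⟨j, hj', hsj⟩
      refine ⟨n, ?_, by omega, hsn, ?_⟩
      · simp only [PySem.Chars.rfind.go]
        rw [if_neg, hgo]
        intro hpre
        rw [isPrefixOf_singleton, List.getElem?_drop] at hpre
        simp only [Nat.add_zero] at hpre
        exact hk hpre
      · intro j' h1 h2
        rcases Nat.lt_or_ge j' (k+1) with h3 | h3
        · exact hmax j' h1 (by omega)
        · have : j' = k + 1 := by omega
          subst this; exact hk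

-- the tail after the last '.' equals the reversed take-while of the reversed list
lemma drop_eq_rev_takeWhile (l : List Char) (n : Nat) (hn : l[n]? = some '.')
    (hmax : ∀ j, n < j → j ≤ l.length → l[j]? ≠ some '.') :
    l.drop (n + 1) = (l.reverse.takeWhile (· ≠ '.')).reverse := by
  have hlt : n < l.length := by
    by_contra h
    rw [List.getElem?_eq_none (by omega)] at hn
    simp at hn
  have hnodot : '.' ∉ l.drop (n + 1) := by
    intro hmem
    obtain ⟨i, hi, hval⟩ := List.getElem_of_mem hmem
    have : l[n + 1 + i]? = some '.' := by
      rw [← List.getElem?_drop, List.getElem?_eq_getElem hi, hval]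
    exact hmax (n + 1 + i) (by omega) (by rw [List.length_drop] at hi; omega) this
  have hsplit : l = l.take n ++ '.' :: l.drop (n + 1) := by
    conv_lhs => rw [← List.take_append_drop n l]
    congr 1
    rw [List.drop_eq_getElem_cons hlt]
    congr 1
    · rw [List.getElem?_eq_getElem hlt] at hn
      exact (Option.some.injEq _ _).mp hn
  conv_rhs => rw [hsplit]
  rw [List.reverse_append, List.reverse_cons, List.append_assoc]
  rw [List.takeWhile_append]
  have hall : ((l.drop (n + 1)).reverse.takeWhile (· ≠ '.')) = (l.drop (n + 1)).reverse := by
    rw [List.takeWhile_eq_self_iff]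
    intro x hx
    simp only [decide_eq_true_eq]
    intro hxe; subst hxe
    exact hnodot (List.mem_reverse.mp hx)
  rw [hall]
  simp

-- '.' in filename  ↔  '.' ∈ filename.toList
lemma isIn_dot_iff (filename : String) :
    PySem.Str.isIn "." filename = true ↔ '.' ∈ filename.toList := by
  rw [PySem.Str.isIn_iff_infix]
  constructor
  · rintro ⟨p, s, hps⟩
    rw [← hps]; simp
  · intro hm
    obtain ⟨p, s, hps⟩ := List.append_of_mem hm
    exact ⟨p, s, by simp [hps]⟩

-- when '.' occurs, A's extension equals B's tail (lowered)
lemma ext_eq (filename : String) (hmem : '.' ∈ filename.toList) :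
    ∃ tail, revScan filename.toList.reverse [] = some tail ∧
      extOf filename = PySem.Str.lower (String.ofList tail) := by
  have hmem' : '.' ∈ filename.toList.reverse := List.mem_reverse.mpr hmem
  rw [revScan_spec]
  rw [if_pos hmem']
  refine ⟨_, rfl, ?_⟩
  unfold extOf
  congr 2
  obtain ⟨i, hi, hval⟩ := List.getElem_of_mem hmem
  have hex : ∃ j ≤ filename.toList.length, filename.toList[j]? = some '.' :=
    ⟨i, by omega, by rw [List.getElem?_eq_getElem hi]; simp [hval]⟩
  obtain ⟨n, hgo, hnk, hsn, hmax⟩ := go_spec filename.toList filename.toList.length hex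
  have hrf : PySem.Str.rfind filename "." = (n : Int) := by
    rw [PySem.Str.rfind_eq]
    unfold PySem.Chars.rfind
    simpa using hgo
  rw [hrf]
  simp only [Int.toNat_natCast, List.append_nil]
  exact drop_eq_rev_takeWhile filename.toList n hsn hmax

-- pointwise: A's loop and B's reverse-index lookup agree on every extension string
set_option maxHeartbeats 2000000 in
lemma lookup_eq_loop (ext : String) :
    PySem.Dict.getD EXT_TO_CATEGORY ext "other" = catLoop ALLOWED_EXTENSIONS ext := by
  simp only [EXT_TO_CATEGORY, ALLOWED_EXTENSIONS, catLoop,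
    PySem.Dict.getD_eq_get?_getD, List.contains, List.elem_eq_mem,
    decide_eq_true_eq, List.mem_cons, List.not_mem_nil, or_false]
  split_ifs with h1 h2 h3 h4
  · rcases h1 with rfl | rfl | rfl | rfl | rfl | rfl | rfl | rfl <;> decide
  · rcases h2 with rfl | rfl | rfl | rfl | rfl | rfl | rfl <;> decide
  · rcases h3 with rfl | rfl | rfl | rfl | rfl | rfl | rfl <;> decide
  · rcases h4 with rfl | rfl | rfl | rfl | rfl | rfl <;> decide
  · push Not at h1 h2 h3 h4
    obtain ⟨a1, a2, a3, a4, a5, a6, a7, a8⟩ := h1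
    obtain ⟨b1, b2, b3, b4, b5, b6, b7⟩ := h2
    obtain ⟨c1, c2, c3, c4, c5, c6, c7⟩ := h3
    obtain ⟨d1, d2, d3, d4, d5, d6⟩ := h4
    simp [PySem.Dict.get?,
      Ne.symm a1, Ne.symm a2, Ne.symm a3, Ne.symm a4, Ne.symm a5, Ne.symm a6, Ne.symm a7, Ne.symm a8,
      Ne.symm b1, Ne.symm b2, Ne.symm b3, Ne.symm b4, Ne.symm b5, Ne.symm b6, Ne.symm b7,
      Ne.symm c1, Ne.symm c2, Ne.symm c3, Ne.symm c4, Ne.symm c5, Ne.symm c6, Ne.symm c7,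
      Ne.symm d1, Ne.symm d2, Ne.symm d3, Ne.symm d4, Ne.symm d5, Ne.symm d6]

-- ===== VERDICT =====
theorem get_file_category_spec : Claim_equal_get_file_category := by
  intro filename _
  unfold Spec_get_file_category get_file_category get_file_category_alt
  by_cases hmem : '.' ∈ filename.toList
  · have hin : PySem.Str.isIn "." filename = true := (isIn_dot_iff filename).mpr hmem
    rw [hin]
    obtain ⟨tail, htail, hext⟩ := ext_eq filename hmem
    rw [htail]
    simp only [Bool.true_eq_false, if_false]
    rw [hext, lookup_eq_loop]
  · have hin : PySem.Str.isIn "." filename = false :=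
      Bool.eq_false_iff.mpr (fun h => hmem ((isIn_dot_iff filename).mp h))
    rw [hin]
    have hnone : revScan filename.toList.reverse [] = none := by
      rw [revScan_spec, if_neg (fun h => hmem (List.mem_reverse.mp h))]
    rw [hnone]
    simp
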